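-- pv_equiv track=rewrite | github.com/fractalego/bert_ner | bert_ner/aux.py | add_bioes
-- ===== SOURCE A (Python) =====
-- def add_bioes(tags):
--     bioes_tags = []
--
--     for i in range(len(tags)):
--         curr = tags[i]
--         if curr in ['OTHER', '[CLS]']:
--             bioes_tags.append(curr)
--             continue
--
--         prior = tags[i - 1] if i - 1 >= 0 else 'OTHER'
--         nxt = tags[i + 1] if i + 1 < len(tags) else 'OTHER'
--
--         if prior != curr and nxt != curr:
--             bioes_tags.append('S-' + curr)
--         if prior == curr and nxt == curr:
--             bioes_tags.append('I-' + curr)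
--         if prior != curr and nxt == curr:
--             bioes_tags.append('B-' + curr)
--         if prior == curr and nxt != curr:
--             bioes_tags.append('E-' + curr)
--
--     return bioes_tags
-- ===== SOURCE B (Python) =====
-- from itertools import groupby
--
--
-- def add_bioes(tags):
--     out = []
--     for tag, group in groupby(tags):
--         n = sum(1 for _ in group)
--         if tag in ('OTHER', '[CLS]'):
--             out.extend([tag] * n)
--         elif n == 1:
--             out.append('S-' + tag)
--         else:
--             out.append('B-' + tag)
--             out.extend(['I-' + tag] * (n - 2))
--             out.append('E-' + tag)
--     return out
-- ===== Notes on version B (the rewrite author's own statement) =====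
-- stated objective: alternative
-- what changed: Replaced the per-index loop with neighbor lookups by an itertools.groupby pass over maximal runs of equal tags, emitting each run's BIOES labels from its length alone.
import Mathlib
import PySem

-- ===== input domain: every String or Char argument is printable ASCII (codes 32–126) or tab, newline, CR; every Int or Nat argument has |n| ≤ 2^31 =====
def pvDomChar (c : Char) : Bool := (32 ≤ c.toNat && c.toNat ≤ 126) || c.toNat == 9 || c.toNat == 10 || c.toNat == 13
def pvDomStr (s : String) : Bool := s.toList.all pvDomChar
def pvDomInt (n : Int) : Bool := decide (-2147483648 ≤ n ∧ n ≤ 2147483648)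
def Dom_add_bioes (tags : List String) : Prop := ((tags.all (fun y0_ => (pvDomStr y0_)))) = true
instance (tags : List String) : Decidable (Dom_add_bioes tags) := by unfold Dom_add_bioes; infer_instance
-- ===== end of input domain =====

-- B replaces A's per-index neighbor comparisons by grouping maximal runs of equal tags and labelling each run from its length (alternative decomposition, same cost).


-- ===== PORT A =====
-- one loop iteration of A: curr/prior/nxt lookups and the four sequential conditional appends
def addBioesStep (tags : List String) (acc : List String) (i : Int) : List String :=
  let curr := PySem.List.pyGetD tags i ""
  if curr = "OTHER" ∨ curr = "[CLS]" then acc ++ [curr]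
  else
    let prior := if 0 ≤ i - 1 then PySem.List.pyGetD tags (i - 1) "" else "OTHER"
    let nxt := if i + 1 < (tags.length : Int) then PySem.List.pyGetD tags (i + 1) "" else "OTHER"
    let acc := if prior ≠ curr ∧ nxt ≠ curr then acc ++ ["S-" ++ curr] else acc
    let acc := if prior = curr ∧ nxt = curr then acc ++ ["I-" ++ curr] else acc
    let acc := if prior ≠ curr ∧ nxt = curr then acc ++ ["B-" ++ curr] else acc
    let acc := if prior = curr ∧ nxt ≠ curr then acc ++ ["E-" ++ curr] else acc
    acc

def add_bioes (tags : List String) : List String :=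
  (PySem.List.pyRange 0 (tags.length : Int) 1).foldl (addBioesStep tags) []

-- ===== PORT B =====
-- labels for one maximal run of tag t of length n (the per-group branch of Source B)
def runLabels (t : String) (n : Nat) : List String :=
  if t = "OTHER" ∨ t = "[CLS]" then List.replicate n t
  else if n = 1 then ["S-" ++ t]
  else ["B-" ++ t] ++ List.replicate (n - 2) ("I-" ++ t) ++ ["E-" ++ t]

-- groupby: peel off the maximal run of the head tag, emit its labels, recurse on the rest
def add_bioes_alt : List String → List String
  | [] => []
  | t :: rest =>
      runLabels t ((rest.takeWhile (· = t)).length + 1)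
        ++ add_bioes_alt (rest.dropWhile (· = t))
termination_by l => l.length
decreasing_by
  exact Nat.lt_succ_of_le (rest.length_dropWhile_le (· = t))

-- ===== PRECONDITION & SPEC =====
def Spec_add_bioes (tags : List String) (out : List String) : Prop := out = add_bioes_alt tags
instance (tags : List String) (out : List String) : Decidable (Spec_add_bioes tags out) := by unfold Spec_add_bioes; infer_instance

-- ===== CLAIM (what is proved, stated in full; the proofs are below) =====
def Claim_equal_add_bioes : Prop := ∀ (tags : List String), Dom_add_bioes tags → Spec_add_bioes tags (add_bioes tags)

-- ===== LEMMAS AND PROOFS =====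

-- the list a single iteration of A appends, given prior/curr/next tags
def emit (prior c nxt : String) : List String :=
  if c = "OTHER" ∨ c = "[CLS]" then [c]
  else ((((if prior ≠ c ∧ nxt ≠ c then ["S-" ++ c] else []) ++
          (if prior = c ∧ nxt = c then ["I-" ++ c] else [])) ++
          (if prior ≠ c ∧ nxt = c then ["B-" ++ c] else [])) ++
          (if prior = c ∧ nxt ≠ c then ["E-" ++ c] else []))

-- A's loop as structural recursion carrying the previous tag
def aRec : String → List String → List String
  | _, [] => []
  | prior, c :: rest => emit prior c (rest.headD "OTHER") ++ aRec c rest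

theorem step_eq (tags acc : List String) (k : Nat) (hk : k < tags.length) :
    addBioesStep tags acc (k : Int)
      = acc ++ emit (if k = 0 then "OTHER" else tags.getD (k-1) "")
                    (tags.getD k "") ((tags.drop (k+1)).headD "OTHER") := by
  have hcurr : PySem.List.pyGetD tags (k : Int) "" = tags.getD k "" := by
    simp [PySem.List.pyGetD_natCast]
  have hprior : (if 0 ≤ (k : Int) - 1 then PySem.List.pyGetD tags ((k : Int) - 1) "" else "OTHER")
      = (if k = 0 then "OTHER" else tags.getD (k-1) "") := by
    rcases Nat.eq_zero_or_pos k with h0 | h0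
    · subst h0; norm_num
    · have : (k : Int) - 1 = ((k - 1 : Nat) : Int) := by omega
      rw [this]
      simp [PySem.List.pyGetD_natCast, Nat.pos_iff_ne_zero.mp h0]
  have hnxt : (if (k : Int) + 1 < (tags.length : Int) then PySem.List.pyGetD tags ((k : Int) + 1) "" else "OTHER")
      = (tags.drop (k+1)).headD "OTHER" := by
    by_cases h : k + 1 < tags.length
    · have h1 : ((k : Int) + 1) = ((k + 1 : Nat) : Int) := by omega
      rw [if_pos (by exact_mod_cast h), h1, PySem.List.pyGetD_natCast]
      rw [List.drop_eq_getElem_cons h]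
      simp [List.getD_eq_getElem?_getD, List.getElem?_eq_getElem h]
    · rw [if_neg (by exact_mod_cast h)]
      rw [List.drop_eq_nil_of_le (by omega)]
      rfl
  unfold addBioesStep emit
  rw [hcurr, hprior, hnxt]
  set p := (if k = 0 then "OTHER" else tags.getD (k-1) "") with hp
  set c := tags.getD k "" with hc
  set n := (tags.drop (k+1)).headD "OTHER" with hn
  by_cases hs : c = "OTHER" ∨ c = "[CLS]"
  · simp [hs]
  · simp only [if_neg hs]
    by_cases h1 : p = c <;> by_cases h2 : n = c <;> simp [h1, h2]

theorem loopA (tags : List String) : ∀ (n k : Nat) (acc : List String),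
    n = tags.length - k → k ≤ tags.length →
    (PySem.List.pyRange (k : Int) (tags.length : Int) 1).foldl (addBioesStep tags) acc
      = acc ++ aRec (if k = 0 then "OTHER" else tags.getD (k-1) "") (tags.drop k) := by
  intro n
  induction n with
  | zero =>
    intro k acc hn hk
    have hke : k = tags.length := by omega
    subst hke
    rw [PySem.List.pyRange_one_eq_nil (by omega)]
    simp [aRec]
  | succ m ih =>
    intro k acc hn hk
    have hklt : k < tags.length := by omega
    rw [PySem.List.pyRange_one_cons (by exact_mod_cast hklt)]
    rw [List.foldl_cons]
    have h1 : ((k : Int) + 1) = ((k + 1 : Nat) : Int) := by omega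
    rw [step_eq tags acc k hklt, h1, ih (k+1) _ (by omega) (by omega)]
    rw [List.drop_eq_getElem_cons hklt]
    have hgd : tags.getD k "" = tags[k] := by
      simp [List.getD_eq_getElem?_getD, List.getElem?_eq_getElem hklt]
    simp only [aRec]
    simp [List.getD_eq_getElem?_getD, List.getElem?_eq_getElem hklt]

theorem a_eq_aRec (tags : List String) : add_bioes tags = aRec "OTHER" tags := by
  unfold add_bioes
  simpa using loopA tags tags.length 0 [] (by omega) (by omega)

theorem alt_special (c : String) (hc : c = "OTHER" ∨ c = "[CLS]") (rest : List String) :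
    add_bioes_alt (c :: rest) = c :: add_bioes_alt rest := by
  cases rest with
  | nil => simp [add_bioes_alt, runLabels, hc]
  | cons r rs =>
    by_cases hr : r = c
    · subst hr
      simp [add_bioes_alt, runLabels, hc, List.replicate_succ]
    · rw [show add_bioes_alt (c :: r :: rs)
          = runLabels c (((r :: rs).takeWhile (· = c)).length + 1)
            ++ add_bioes_alt ((r :: rs).dropWhile (· = c)) from by simp [add_bioes_alt]]
      simp [hr, runLabels, hc]

theorem dropWhile_head_ne (l : List String) (c : String) (h : String)
    (hh : (l.dropWhile (· = c)).head? = some h) : h ≠ c := by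
  have := List.head?_dropWhile_not (· = c) l
  rw [hh] at this
  simpa using this

theorem innerRun (c : String) (hc : ¬(c = "OTHER" ∨ c = "[CLS]")) :
    ∀ (m : Nat) (a : List String), (∀ h, a.head? = some h → h ≠ c) →
    aRec c (c :: (List.replicate m c ++ a))
      = List.replicate m ("I-" ++ c) ++ ("E-" ++ c) :: aRec c a := by
  have hcO : c ≠ "OTHER" := fun h => hc (Or.inl h)
  intro m
  induction m with
  | zero =>
    intro a ha
    have hn : a.headD "OTHER" ≠ c := by
      cases a with
      | nil => simpa using fun h => hcO h.symm
      | cons x xs => simpa using ha x rfl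
    simp only [List.replicate, List.nil_append, aRec]
    have hn' : a.head?.getD "OTHER" ≠ c := by cases a <;> simpa using hn
    simp [emit, hc, hn']
  | succ m ih =>
    intro a ha
    have h1 : aRec c (c :: (List.replicate (m+1) c ++ a))
        = emit c c c ++ aRec c (c :: (List.replicate m c ++ a)) := by
      rw [List.replicate_succ]
      simp [aRec]
    rw [h1, ih a ha]
    simp [emit, hc, List.replicate_succ]

theorem aRec_eq_alt_aux : ∀ (n : Nat) (l : List String), l.length ≤ n → ∀ (prior : String),
    (∀ h, l.head? = some h → h = "OTHER" ∨ h = "[CLS]" ∨ prior ≠ h) →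
    aRec prior l = add_bioes_alt l := by
  intro n
  induction n with
  | zero =>
    intro l hl prior _
    have : l = [] := List.eq_nil_of_length_eq_zero (by omega)
    subst this
    simp [aRec, add_bioes_alt]
  | succ m ih =>
    intro l hl prior hinv
    cases l with
    | nil => simp [aRec, add_bioes_alt]
    | cons c rest =>
      simp only [List.length_cons] at hl
      by_cases hspec : c = "OTHER" ∨ c = "[CLS]"
      · have h1 : aRec prior (c :: rest) = c :: aRec c rest := by
          simp [aRec, emit, hspec]
        rw [h1, alt_special c hspec rest, ih rest (by omega) c ?_]
        intro h hh
        by_cases hs2 : h = "OTHER" ∨ h = "[CLS]"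
        · tauto
        · right; right
          intro hch
          rcases hspec with h' | h' <;> (subst hch; tauto)
      · have hpc : prior ≠ c := by
          rcases hinv c (by simp) with h | h | h <;> tauto
        have hrest := List.takeWhile_append_dropWhile (p := (· = c)) (l := rest)
        have htw : rest.takeWhile (· = c) = List.replicate (rest.takeWhile (· = c)).length c :=
          List.eq_replicate_of_mem (fun b hb => by simpa using List.mem_takeWhile_imp hb)
        have hdw : ∀ h, (rest.dropWhile (· = c)).head? = some h → h ≠ c :=
          fun h hh => dropWhile_head_ne rest c h hh
        have hdwinv : ∀ h, (rest.dropWhile (· = c)).head? = some h →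
            h = "OTHER" ∨ h = "[CLS]" ∨ c ≠ h := by
          intro h hh; right; right; exact fun he => hdw h hh he.symm
        have hdwlen : (rest.dropWhile (· = c)).length ≤ m :=
          le_trans (rest.length_dropWhile_le (· = c)) (by omega)
        cases htwc : rest.takeWhile (· = c) with
        | nil =>
          have hrdw : rest.dropWhile (· = c) = rest := by
            rw [htwc] at hrest; simpa using hrest
          have hn : rest.headD "OTHER" ≠ c := by
            cases hrr : rest with
            | nil => simpa using fun h => hspec (Or.inl h.symm)
            | cons x xs =>
              have : rest.head? = some x := by rw [hrr]; rfl
              rw [← hrdw] at this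
              have hx : x ≠ c := hdw x this
              simpa using hx
          have h1 : aRec prior (c :: rest) = ("S-" ++ c) :: aRec c rest := by
            simp only [aRec]
            have hn' : rest.head?.getD "OTHER" ≠ c := by cases rest <;> simpa using hn
            simp [emit, hspec, hpc, hn']
          rw [h1, ih rest (by omega) c (by rw [← hrdw]; exact hdwinv)]
          rw [show add_bioes_alt (c :: rest)
              = runLabels c ((rest.takeWhile (· = c)).length + 1)
                ++ add_bioes_alt (rest.dropWhile (· = c)) from by simp [add_bioes_alt]]
          rw [htwc, hrdw]
          simp [runLabels, hspec]
        | cons t tw' =>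
          have htc : t = c := by
            have : t ∈ rest.takeWhile (· = c) := by rw [htwc]; simp
            simpa using List.mem_takeWhile_imp this
          subst htc
          have htw' : tw' = List.replicate tw'.length t := by
            rw [htwc] at htw
            simpa [List.replicate_succ] using htw
          have hrr : rest = t :: (List.replicate tw'.length t ++ rest.dropWhile (· = t)) := by
            conv_lhs => rw [← hrest, htwc]
            rw [← htw']
            simp
          have h1 : aRec prior (t :: rest) = ("B-" ++ t) :: aRec t rest := by
            simp only [aRec]
            have : rest.head?.getD "OTHER" = t := by rw [hrr]; rfl
            simp [emit, hspec, hpc, this]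
          rw [h1]
          rw [show aRec t rest = aRec t (t :: (List.replicate tw'.length t ++ rest.dropWhile (· = t))) from by rw [← hrr]]
          rw [innerRun t hspec tw'.length _ hdw]
          rw [ih (rest.dropWhile (· = t)) hdwlen t hdwinv]
          rw [show add_bioes_alt (t :: rest)
              = runLabels t ((rest.takeWhile (· = t)).length + 1)
                ++ add_bioes_alt (rest.dropWhile (· = t)) from by simp [add_bioes_alt]]
          rw [htwc]
          simp [runLabels, hspec]

-- ===== VERDICT (by name: the statement is the Claim_ definition above) =====
theorem add_bioes_spec : Claim_equal_add_bioes := by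
  intro tags _
  unfold Spec_add_bioes
  rw [a_eq_aRec]
  refine aRec_eq_alt_aux tags.length tags le_rfl "OTHER" ?_
  intro h _
  by_cases hh : h = "OTHER" <;> tauto
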